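-- pv_equiv track=rewrite | github.com/bdaene/ilemaths | une-equation-diophantienne-881391.py | solve
-- ===== SOURCE A (Python) =====
-- def solve(a):
--     p = 2*a
--     m = 12*a**p
--     b, c, bp, cp = 1, 2, 1, 2**p
--     while b < c:
--         if bp + m < cp:
--             b += 1
--             bp = b**p
--         else:
--             if bp + m == cp:
--                 yield b, c
--             c += 1
--             cp = c**p
-- ===== SOURCE B (Python) =====
-- # B replaces A's synchronized two-pointer sweep by a per-b exact p-th-root test,
-- # guarded by a cheap modular p-th-power-residue filter so the root search is rare.
-- def _iroot(n, p):
--     hi = 1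
--     while hi ** p <= n:
--         hi *= 2
--     lo = 0
--     while hi - lo > 1:
--         mid = (lo + hi) // 2
--         if mid ** p <= n:
--             lo = mid
--         else:
--             hi = mid
--     return lo
--
-- def solve(a):
--     p = 2 * a
--     m = 12 * a ** p
--     mods = [16, 9, 5, 7, 11, 13, 17]
--     res = [{pow(x, p, q) for x in range(q)} for q in mods]
--     b, bp = 1, 1
--     while True:
--         bp1 = (b + 1) ** p
--         t = bp + m
--         if bp1 > t:
--             return
--         if all(t % q in r for q, r in zip(mods, res)):
--             c = _iroot(t, p)
--             if c ** p == t: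
--                 yield b, c
--         b, bp = b + 1, bp1
-- ===== Notes on version B (the rewrite author's own statement) =====
-- stated objective: alternative
-- what changed: Replaces A's synchronized two-pointer sweep over (b,c) with an independent per-b exact integer p-th-root test (bisection), guarded by a modular p-th-power-residue filter that rejects almost every b without a root search; b is visited in the same increasing order and the identical pairs are produced.
import Mathlib
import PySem

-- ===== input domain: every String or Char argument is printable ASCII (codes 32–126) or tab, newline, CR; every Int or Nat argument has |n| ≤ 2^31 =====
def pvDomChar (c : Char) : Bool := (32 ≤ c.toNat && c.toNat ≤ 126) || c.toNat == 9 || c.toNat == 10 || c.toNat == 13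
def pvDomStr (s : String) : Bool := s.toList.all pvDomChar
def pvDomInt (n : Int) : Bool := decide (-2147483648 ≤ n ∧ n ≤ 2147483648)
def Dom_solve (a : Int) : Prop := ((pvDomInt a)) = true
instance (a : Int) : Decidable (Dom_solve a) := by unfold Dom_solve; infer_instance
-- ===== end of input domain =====

-- B replaces A's two-pointer sweep by a per-b exact integer p-th root test (alternative
-- decomposition, not claimed faster).  Both Pythons are generators; the ports return the
-- list of yielded pairs.  For a ≤ 0 the Python loops never terminate (no value is ever
-- returned), so Pre_solve excludes those inputs; the ports return [] there (totality guard).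

-- pow-gap lemma, needed by the ports' termination proofs (cited in decreasing_by).
-- All proofs reachable from the definitions are written with small explicit terms.
theorem pvPowGapAux (k d : Nat) : d ^ (k + 2) + 2 * d + 1 ≤ (d + 1) ^ (k + 2) := by
  induction k with
  | zero => exact le_of_eq (by ring)
  | succ k ih =>
    have e2 : (d ^ (k + 2) + 2 * d + 1) * (d + 1)
        = (d ^ (k + 1 + 2) + 2 * d + 1) + (d ^ (k + 2) + 2 * (d * d) + d) := by ring
    calc d ^ (k + 1 + 2) + 2 * d + 1
        ≤ (d ^ (k + 1 + 2) + 2 * d + 1) + (d ^ (k + 2) + 2 * (d * d) + d) :=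
          Nat.le_add_right _ _
      _ = (d ^ (k + 2) + 2 * d + 1) * (d + 1) := e2.symm
      _ ≤ (d + 1) ^ (k + 2) * (d + 1) := Nat.mul_le_mul ih (le_refl (d + 1))
      _ = (d + 1) ^ (k + 1 + 2) := by ring

theorem pvPowGap (d p : Nat) (hp : 2 ≤ p) : d ^ p + 2 * d + 1 ≤ (d + 1) ^ p := by
  obtain ⟨k, rfl⟩ := Nat.exists_eq_add_of_le hp
  rw [Nat.add_comm 2 k]
  exact pvPowGapAux k d

-- termination helpers (cited by name in decreasing_by so the definitions stay small)
theorem pvDecA1 (m b c : Nat) (h : b < c) :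
    (c - (b + 1)) + 2 * ((m + 2) - c) < (c - b) + 2 * ((m + 2) - c) :=
  Nat.add_lt_add_right (Nat.sub_lt_sub_left h (Nat.lt_succ_self b)) _

theorem pvMeasA (b d m : Nat) (hbd : b ≤ d + 1) (hdm : 2 * d + 1 ≤ m) :
    ((d + 1 + 1) - b) + 2 * ((m + 2) - (d + 1 + 1))
      < ((d + 1) - b) + 2 * ((m + 2) - (d + 1)) := by
  have hd1 : d + 1 ≤ m + 1 := by
    have hdd : d ≤ 2 * d := by rw [two_mul]; exact Nat.le_add_right d d
    exact le_trans (le_trans (Nat.add_le_add_right hdd 1) hdm) (Nat.le_succ m)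
  have e1 : (d + 1 + 1) - b = ((d + 1) - b) + 1 := Nat.succ_sub hbd
  have e2 : (m + 2) - (d + 1) = ((m + 2) - (d + 1 + 1)) + 1 := by
    have e3 : (m + 2) - (d + 1 + 1) = (m + 1) - (d + 1) := Nat.succ_sub_succ (m + 1) (d + 1)
    rw [e3]
    exact Nat.succ_sub hd1
  rw [e1, e2, Nat.mul_succ]
  rw [Nat.add_assoc, Nat.add_comm 1 (2 * ((m + 2) - (d + 1 + 1)))]
  exact Nat.add_lt_add_left (Nat.add_lt_add_left (Nat.lt_succ_self 1) _) _

theorem pvDecA2 (p m b c : Nat) (hp : 2 ≤ p) (h : b < c) (h2 : ¬ b ^ p + m < c ^ p) :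
    ((c + 1) - b) + 2 * ((m + 2) - (c + 1)) < (c - b) + 2 * ((m + 2) - c) := by
  cases c with
  | zero => exact absurd h (Nat.not_lt_zero b)
  | succ d =>
    have hbd : b ≤ d := Nat.lt_succ_iff.mp h
    have hbp : b ^ p ≤ d ^ p := Nat.pow_le_pow_left hbd p
    have hch : b ^ p + m < (d + 1) ^ p → False := h2
    have hle : (d + 1) ^ p ≤ b ^ p + m := Nat.le_of_not_lt h2
    have hch2 : d ^ p + (2 * d + 1) ≤ d ^ p + m := by
      rw [← Nat.add_assoc]
      exact le_trans (pvPowGap d p hp) (le_trans hle (Nat.add_le_add_right hbp m))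
    exact pvMeasA b d m (Nat.le_succ_of_le hbd) (Nat.le_of_add_le_add_left hch2)

-- ===== PORT A =====
-- A maintains cached powers bp = b**p, cp = c**p; the port recomputes b^p, c^p (same values).
def loopA (p m : Nat) (hp : 2 ≤ p) (b c : Nat) : List (Nat × Nat) :=
  if _h : b < c then
    if _h2 : b ^ p + m < c ^ p then
      loopA p m hp (b + 1) c
    else
      (if b ^ p + m = c ^ p then [(b, c)] else []) ++ loopA p m hp b (c + 1)
  else []
termination_by (c - b) + 2 * ((m + 2) - c)
decreasing_by
  · exact pvDecA1 m b c _h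
  · exact pvDecA2 p m b c hp _h _h2

-- port of A: solve(a) — yields (b,c) with b**(2a)+12a**(2a)=c**(2a), two-pointer sweep
theorem pvTwoLe (a : Int) (ha : ¬ a ≤ 0) : 2 ≤ (2 * a).toNat := by
  have h0 : (0 : Int) + 1 ≤ a := Int.lt_iff_add_one_le.mp (not_le.mp ha)
  rw [zero_add] at h0
  have h2 : (2 : Int) ≤ 2 * a := by
    have hm := mul_le_mul_of_nonneg_left h0 (by decide : (0 : Int) ≤ 2)
    rw [mul_one] at hm
    exact hm
  exact Int.toNat_le_toNat h2

def solve (a : Int) : List (Int × Int) :=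
  if ha : a ≤ 0 then []  -- Python never returns for a ≤ 0 (infinite loop); totality guard
  else
    let p : Nat := (2 * a).toNat
    let m : Nat := 12 * a.toNat ^ p
    (loopA p m (pvTwoLe a ha) 1 2).map (fun bc => ((bc.1 : Int), (bc.2 : Int)))

-- ===== PORT B =====
-- _iroot: doubling phase (hi *= 2 while hi**p <= n)
theorem pvDblPos (hi : Nat) (hhi : 1 ≤ hi) : 1 ≤ 2 * hi :=
  le_trans hhi (by rw [two_mul]; exact Nat.le_add_right hi hi)

theorem pvDecDbl (n p hi : Nat) (hp : 1 ≤ p) (hhi : 1 ≤ hi) (h : hi ^ p ≤ n) :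
    n + 1 - 2 * hi < n + 1 - hi := by
  have h1 : hi ≤ n := le_trans (Nat.le_self_pow (Nat.one_le_iff_ne_zero.mp hp) hi) h
  have h2 : hi < 2 * hi := by rw [two_mul]; exact Nat.lt_add_of_pos_right hhi
  exact Nat.sub_lt_sub_left (Nat.lt_succ_of_le h1) h2

def irootDouble (n p : Nat) (hp : 1 ≤ p) (hi : Nat) (hhi : 1 ≤ hi) : Nat :=
  if _h : hi ^ p ≤ n then irootDouble n p hp (2 * hi) (pvDblPos hi hhi) else hi
termination_by n + 1 - hi
decreasing_by
  exact pvDecDbl n p hi hp hhi _h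

-- _iroot: bisection phase
theorem pvDecBisAux (lo hi : Nat) (h : 1 < hi - lo) : lo + 1 ≤ (lo + hi) / 2 := by
  have h1 : 1 + lo < hi := Nat.lt_sub_iff_add_lt.mp h
  have h2 : lo + 2 ≤ hi := by
    rw [show lo + 2 = 1 + lo + 1 by ring]
    exact Nat.succ_le_of_lt h1
  refine (Nat.le_div_iff_mul_le (by decide)).mpr ?_
  have e : (lo + 1) * 2 = lo + (lo + 2) := by ring
  rw [e]
  exact Nat.add_le_add_left h2 lo

theorem pvDecBis1 (lo hi : Nat) (h : 1 < hi - lo) : hi - (lo + hi) / 2 < hi - lo := by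
  have h1 : 1 + lo < hi := Nat.lt_sub_iff_add_lt.mp h
  have hlh : lo < hi := lt_of_le_of_lt (Nat.le_add_left lo 1) h1
  exact Nat.sub_lt_sub_left hlh (Nat.lt_of_lt_of_le (Nat.lt_succ_self lo) (pvDecBisAux lo hi h))

theorem pvDecBis2 (lo hi : Nat) (h : 1 < hi - lo) : (lo + hi) / 2 - lo < hi - lo := by
  have h1 : 1 + lo < hi := Nat.lt_sub_iff_add_lt.mp h
  have hlh : lo < hi := lt_of_le_of_lt (Nat.le_add_left lo 1) h1
  have hdiv : (lo + hi) / 2 < hi := by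
    refine (Nat.div_lt_iff_lt_mul (by decide)).mpr ?_
    have e : hi * 2 = hi + hi := by ring
    rw [e]
    exact Nat.add_lt_add_right hlh hi
  exact Nat.sub_lt_sub_right (le_trans (Nat.le_succ lo) (pvDecBisAux lo hi h)) hdiv

def irootBis (n p lo hi : Nat) : Nat :=
  if _h : 1 < hi - lo then
    if ((lo + hi) / 2) ^ p ≤ n then irootBis n p ((lo + hi) / 2) hi
    else irootBis n p lo ((lo + hi) / 2)
  else lo
termination_by hi - lo
decreasing_by
  · exact pvDecBis1 lo hi _h
  · exact pvDecBis2 lo hi _h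

def iroot (n p : Nat) (hp : 1 ≤ p) : Nat :=
  irootBis n p 0 (irootDouble n p hp 1 (le_refl 1))

theorem pvOneLe (p : Nat) (hp : 2 ≤ p) : 1 ≤ p := le_trans (by decide) hp

theorem pvDecB (p m b : Nat) (hp : 2 ≤ p) (h : (b + 1) ^ p ≤ b ^ p + m) :
    (m + 2) - (b + 1) < (m + 2) - b := by
  have hch : b ^ p + (2 * b + 1) ≤ b ^ p + m := by
    rw [← Nat.add_assoc]
    exact le_trans (pvPowGap b p hp) h
  have hbm : 2 * b + 1 ≤ m := Nat.le_of_add_le_add_left hch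
  have hb2 : b ≤ m := by
    have hdd : b ≤ 2 * b := by rw [two_mul]; exact Nat.le_add_right b b
    exact le_trans (le_trans hdd (Nat.le_succ (2 * b))) hbm
  exact Nat.sub_lt_sub_left (Nat.lt_succ_of_le (Nat.le_succ_of_le hb2)) (Nat.lt_succ_self b)

-- the moduli of B's residue filter, and the filter itself (Source B precomputes the
-- residue sets once; the port recomputes them — same values)
def pvMods : List Nat := [16, 9, 5, 7, 11, 13, 17]

def pvFilter (p t : Nat) : Bool :=
  pvMods.all (fun q =>
    PySem.Set.contains (PySem.Set.ofList ((List.range q).map (fun x => x ^ p % q))) (t % q))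

-- B maintains bp = b**p incrementally; the port recomputes b^p (same values).
def loopB (p m : Nat) (hp : 2 ≤ p) (b : Nat) : List (Nat × Nat) :=
  if _h : (b + 1) ^ p ≤ b ^ p + m then
    (if pvFilter p (b ^ p + m) = true then
      (if (iroot (b ^ p + m) p (pvOneLe p hp)) ^ p = b ^ p + m
       then [(b, iroot (b ^ p + m) p (pvOneLe p hp))] else [])
     else [])
      ++ loopB p m hp (b + 1)
  else []
termination_by (m + 2) - b
decreasing_by
  exact pvDecB p m b hp _h

-- port of B: same wrapper, per-b exact-root scan
def solve_alt (a : Int) : List (Int × Int) :=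
  if ha : a ≤ 0 then []  -- Python never returns for a ≤ 0 (infinite loop); totality guard
  else
    let p : Nat := (2 * a).toNat
    let m : Nat := 12 * a.toNat ^ p
    (loopB p m (pvTwoLe a ha) 1).map (fun bc => ((bc.1 : Int), (bc.2 : Int)))

-- ===== PRECONDITION & SPEC =====
-- For a ≤ 0 the Python A (and B) loops forever and never returns a value, so those
-- inputs are excluded; Pre_solve is exactly the inputs on which A returns.
def Pre_solve (a : Int) : Prop := 1 ≤ a
instance (a : Int) : Decidable (Pre_solve a) := by unfold Pre_solve; infer_instance
def pvWitness_solve : Int := (1)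

def Spec_solve (a : Int) (out : List (Int × Int)) : Prop := out = solve_alt a
instance (a : Int) (out : List (Int × Int)) : Decidable (Spec_solve a out) := by unfold Spec_solve; infer_instance

-- ===== CLAIM (what is proved, stated in full; the proofs are below) =====
def Claim_equal_solve : Prop := ∀ (a : Int), Dom_solve a → Pre_solve a → Spec_solve a (solve a)

-- ===== LEMMAS AND PROOFS =====

theorem irootDouble_gt (n p : Nat) (hp : 1 ≤ p) (hi : Nat) (hhi : 1 ≤ hi) :
    n < (irootDouble n p hp hi hhi) ^ p := by
  induction hi, hhi using irootDouble.induct n p hp with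
  | case1 hi hhi h ih => rw [irootDouble, dif_pos h]; exact ih
  | case2 hi hhi h => rw [irootDouble, dif_neg h]; omega

theorem irootBis_spec (n p lo hi : Nat) :
    lo ^ p ≤ n → n < hi ^ p →
    (irootBis n p lo hi) ^ p ≤ n ∧ n < (irootBis n p lo hi + 1) ^ p := by
  induction lo, hi using irootBis.induct n p with
  | case1 lo hi h hmid ih =>
    intro hlo hhi
    rw [irootBis, dif_pos h, if_pos hmid]; exact ih hmid hhi
  | case2 lo hi h hmid ih =>
    intro hlo hhi
    rw [irootBis, dif_pos h, if_neg hmid]; exact ih hlo (by omega)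
  | case3 lo hi h =>
    intro hlo hhi
    rw [irootBis, dif_neg h]
    refine ⟨hlo, ?_⟩
    have hle : hi ≤ lo + 1 := by omega
    calc n < hi ^ p := hhi
      _ ≤ (lo + 1) ^ p := Nat.pow_le_pow_left hle p

theorem iroot_le (n p : Nat) (hp : 1 ≤ p) : (iroot n p hp) ^ p ≤ n := by
  unfold iroot
  have hz : (0 : Nat) ^ p = 0 := Nat.zero_pow (by omega)
  exact (irootBis_spec n p 0 _ (by omega) (irootDouble_gt n p hp 1 (le_refl 1))).1

theorem iroot_lt_succ (n p : Nat) (hp : 1 ≤ p) : n < (iroot n p hp + 1) ^ p := by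
  unfold iroot
  have hz : (0 : Nat) ^ p = 0 := Nat.zero_pow (by omega)
  exact (irootBis_spec n p 0 _ (by omega) (irootDouble_gt n p hp 1 (le_refl 1))).2

-- characterization: x ≤ iroot n p ↔ x^p ≤ n
theorem le_iroot_iff (n p : Nat) (hp : 1 ≤ p) (x : Nat) :
    x ≤ iroot n p hp ↔ x ^ p ≤ n := by
  constructor
  · intro h; exact le_trans (Nat.pow_le_pow_left h p) (iroot_le n p hp)
  · intro h
    by_contra hlt
    have h1 : iroot n p hp + 1 ≤ x := by omega
    have := Nat.pow_le_pow_left h1 p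
    have := iroot_lt_succ n p hp
    omega

-- the residue filter never rejects an exact p-th power
theorem pvFilter_sound (p t c : Nat) (hc : c ^ p = t) : pvFilter p t = true := by
  have key : ∀ q : Nat, 0 < q →
      PySem.Set.contains
        (PySem.Set.ofList ((List.range q).map (fun x => x ^ p % q))) (t % q) = true := by
    intro q hq
    rw [PySem.Set.contains_iff, PySem.Set.mem_ofList]
    refine List.mem_map.mpr ⟨c % q, List.mem_range.mpr (Nat.mod_lt c hq), ?_⟩
    rw [← Nat.pow_mod, hc]
  unfold pvFilter pvMods
  simp only [List.all_cons, List.all_nil, Bool.and_true, Bool.and_eq_true]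
  exact ⟨key 16 (by decide), key 9 (by decide), key 5 (by decide), key 7 (by decide),
    key 11 (by decide), key 13 (by decide), key 17 (by decide)⟩

-- so B's guarded yield equals the unguarded exact-root yield
theorem filter_collapse (p t : Nat) (hp1 : 1 ≤ p) (y : Nat × Nat) :
    (if pvFilter p t = true then
      (if (iroot t p hp1) ^ p = t then [y] else ([] : List (Nat × Nat)))
     else [])
      = (if (iroot t p hp1) ^ p = t then [y] else []) := by
  by_cases hE : (iroot t p hp1) ^ p = t
  · rw [if_pos (pvFilter_sound p t _ hE)]
  · simp [hE]

-- convexity of x^p: gap (b+1)^p - b^p is monotone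
theorem pow_convex (b p : Nat) : 2 * (b + 1) ^ p ≤ b ^ p + (b + 2) ^ p := by
  induction p with
  | zero => simp
  | succ p ih =>
    have h2 : b ^ p ≤ (b + 2) ^ p := Nat.pow_le_pow_left (by omega) p
    have e1 : b ^ (p + 1) = b * b ^ p := by ring
    have e2 : (b + 2) ^ (p + 1) = (b + 2) * (b + 2) ^ p := by ring
    have e3 : (b + 1) ^ (p + 1) = (b + 1) * (b + 1) ^ p := by ring
    nlinarith [ih, h2]

-- once the while-condition of B fails at b it fails at b+1 too, so loopB (b+1) = []
theorem loopB_nil (p m : Nat) (hp : 2 ≤ p) (b : Nat) (hstep : b ^ p + m < (b + 1) ^ p) :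
    loopB p m hp (b + 1) = [] := by
  rw [loopB]
  have hcv := pow_convex b p
  have e : b + 1 + 1 = b + 2 := by omega
  rw [e, dif_neg (by omega)]

-- the main simulation lemma: from any reachable state (b, c) of A's two-pointer loop,
-- A's remaining output is the (possible) exact-root pair for b followed by B's scan from b+1
theorem loopA_eq (p m : Nat) (hp : 2 ≤ p) (hp1 : 1 ≤ p) :
    ∀ k b c, (c - b) + 2 * ((m + 2) - c) ≤ k → 1 ≤ b → b < c → (c - 1) ^ p ≤ b ^ p + m →
    loopA p m hp b c =
      (if c ^ p ≤ b ^ p + m ∧ (iroot (b ^ p + m) p hp1) ^ p = b ^ p + m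
       then [(b, iroot (b ^ p + m) p hp1)] else [])
        ++ loopB p m hp (b + 1) := by
  intro k
  induction k with
  | zero =>
    intro b c hk hb hbc hI
    exact absurd hbc (by omega)
  | succ k ih =>
    intro b c hk hb hbc hI
    rw [loopA, dif_pos hbc]
    by_cases h2 : b ^ p + m < c ^ p
    · -- branch 1: b += 1
      rw [dif_pos h2]
      rw [if_neg (fun hcon => absurd hcon.1 (by omega))]
      by_cases hc : b + 1 < c
      · -- still inside the loop for b+1
        have hI' : (c - 1) ^ p ≤ (b + 1) ^ p + m := by
          have : b ^ p ≤ (b + 1) ^ p := Nat.pow_le_pow_left (by omega) p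
          omega
        rw [ih (b + 1) c (by omega) (by omega) hc hI']
        conv_rhs => rw [loopB]
        by_cases h3 : (b + 1 + 1) ^ p ≤ (b + 1) ^ p + m
        · rw [dif_pos h3, filter_collapse]
          simp only [List.nil_append]
          congr 1
          -- conditions agree: exactness forces c ≤ root
          by_cases hE : (iroot ((b + 1) ^ p + m) p hp1) ^ p = (b + 1) ^ p + m
          · have hpowlt : b ^ p < (b + 1) ^ p :=
              Nat.pow_lt_pow_left (by omega) (by omega)
            have hcle : c ^ p ≤ (b + 1) ^ p + m := by
              by_contra hgt
              have hnot : ¬ c ≤ iroot ((b + 1) ^ p + m) p hp1 := by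
                rw [le_iroot_iff]; omega
              have hroot : iroot ((b + 1) ^ p + m) p hp1 ≤ c - 1 := by omega
              have hmono := Nat.pow_le_pow_left hroot p
              have hcd : (c - 1) ^ p ≤ b ^ p + m := hI
              omega
            rw [if_pos ⟨hcle, hE⟩, if_pos hE]
          · rw [if_neg (by tauto), if_neg hE]
        · rw [dif_neg h3]
          have hfirst :
              ¬ (c ^ p ≤ (b + 1) ^ p + m ∧
                 (iroot ((b + 1) ^ p + m) p hp1) ^ p = (b + 1) ^ p + m) := by
            rintro ⟨hcle, hE⟩
            have hcr : c ≤ iroot ((b + 1) ^ p + m) p hp1 := by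
              rw [le_iroot_iff]; exact hcle
            have hx : (b + 1 + 1) ^ p ≤ (b + 1) ^ p + m :=
              (le_iroot_iff ((b + 1) ^ p + m) p hp1 (b + 1 + 1)).mp (by omega)
            exact h3 hx
          rw [if_neg hfirst, loopB_nil p m hp (b + 1) (by omega)]
      · -- b + 1 = c: A's loop exits; B yields nothing from b+1 on
        obtain rfl : c = b + 1 := by omega
        rw [loopA, dif_neg (by omega)]
        rw [loopB_nil p m hp b (by omega)]
        rfl
    · -- branch 2: c += 1 (c^p ≤ b^p + m)
      rw [dif_neg h2]
      have hle : c ^ p ≤ b ^ p + m := by omega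
      have hcm : c ≤ m := by
        obtain ⟨d, rfl⟩ : ∃ d, c = d + 1 := ⟨c - 1, by omega⟩
        have hb' : b ^ p ≤ d ^ p := Nat.pow_le_pow_left (by omega) p
        have := pvPowGap d p hp
        omega
      have hI' : (c + 1 - 1) ^ p ≤ b ^ p + m := by simpa using hle
      rw [ih b (c + 1) (by omega) hb (by omega) hI']
      have hsucc : c ^ p < (c + 1) ^ p := Nat.pow_lt_pow_left (by omega) (by omega)
      by_cases hE : b ^ p + m = c ^ p
      · -- exact hit: yielded now, root = c, tail's condition false
        have hceq : iroot (b ^ p + m) p hp1 = c := by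
          have h1 : c ≤ iroot (b ^ p + m) p hp1 := by rw [le_iroot_iff]; omega
          have h2' : iroot (b ^ p + m) p hp1 ≤ c := by
            by_contra hgt
            have hx : (c + 1) ^ p ≤ b ^ p + m :=
              (le_iroot_iff (b ^ p + m) p hp1 (c + 1)).mp (by omega)
            omega
          omega
        have hnext : ¬ ((c + 1) ^ p ≤ b ^ p + m ∧
            (iroot (b ^ p + m) p hp1) ^ p = b ^ p + m) := by
          rintro ⟨hc1, _⟩
          omega
        rw [if_pos hE, if_neg hnext,
          if_pos (show c ^ p ≤ b ^ p + m ∧ (iroot (b ^ p + m) p hp1) ^ p = b ^ p + m by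
            rw [hceq]; exact ⟨hle, hE.symm⟩)]
        rw [hceq]
        simp
      · -- no hit at c: conditions for c and c+1 coincide
        rw [if_neg hE]
        simp only [List.nil_append]
        congr 1
        by_cases hEx : (iroot (b ^ p + m) p hp1) ^ p = b ^ p + m
        · have hroot_ne : iroot (b ^ p + m) p hp1 ≠ c := by
            intro hcontra; rw [hcontra] at hEx; exact hE hEx.symm
          have hcle : c ≤ iroot (b ^ p + m) p hp1 := by rw [le_iroot_iff]; exact hle
          have hc1 : (c + 1) ^ p ≤ b ^ p + m :=
            (le_iroot_iff (b ^ p + m) p hp1 (c + 1)).mp (by omega)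
          rw [if_pos ⟨hc1, hEx⟩, if_pos ⟨hle, hEx⟩]
        · rw [if_neg (by tauto), if_neg (by tauto)]

-- top-level loop equality
theorem loopA_eq_loopB (p m : Nat) (hp : 2 ≤ p) :
    loopA p m hp 1 2 = loopB p m hp 1 := by
  have hp1 : 1 ≤ p := by omega
  rw [loopA_eq p m hp hp1 ((2 - 1) + 2 * ((m + 2) - 2)) 1 2 (le_refl _) (le_refl 1)
    (by omega) (by norm_num)]
  conv_rhs => rw [loopB]
  simp only [show (1 : Nat) + 1 = 2 by norm_num]
  by_cases h : 2 ^ p ≤ 1 ^ p + m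
  · rw [dif_pos h, filter_collapse]
    congr 1
    by_cases hE : (iroot (1 ^ p + m) p hp1) ^ p = 1 ^ p + m
    · rw [if_pos ⟨h, hE⟩, if_pos hE]
    · rw [if_neg (by tauto), if_neg hE]
  · rw [dif_neg h]
    rw [if_neg (fun hcon => h hcon.1)]
    have e11 : ((1 : Nat) + 1) = 2 := by norm_num
    have : loopB p m hp 2 = [] := by
      have hnil := loopB_nil p m hp 1 (by rw [e11]; omega)
      rw [e11] at hnil
      exact hnil
    rw [this]
    simp

-- ===== VERDICT (by name: the statement is the Claim_ definition above) =====
theorem solve_spec : Claim_equal_solve := by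
  intro a _hdom hpre
  have ha : ¬ a ≤ 0 := by unfold Pre_solve at hpre; omega
  unfold Spec_solve
  simp only [solve, solve_alt, dif_neg ha]
  rw [loopA_eq_loopB]
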